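-- pv_equiv track=rewrite | github.com/modelscope/agentscope | src/agentscope/workstation/app/workflow_engine/as_workflow/utils/misc.py | create_variable_mapping
-- ===== SOURCE A (Python) =====
-- from typing import List, Any, Dict, Optional, Union, Tuple
--
-- def create_variable_mapping(placeholders: List[str]) -> Dict[str, str]:
--     """
--     Create a mapping of variable names from a list of placeholders.
--
--     This function processes a list of placeholder strings that represent
--     variable names. It creates a new mapping of these variable names with a
--     simplified or transformed format.
--
--     Args:
--         placeholders (List[str]): A list of placeholder strings representing
--             variable names.
--
--     Returns:
--         Dict[str, str]: A dictionary mapping original placeholders to their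
--             new variable names.
--     """
--
--     def can_convert_to_int(s: str) -> bool:
--         try:
--             int(s)
--             return True
--         except ValueError:
--             return False
--
--     # Dictionary to store the old to new variable name mapping
--     mapping = {}
--     # Dictionary to store the old to new variable name mapping
--     full_var_mapping = {}
--     # Dictionary to track the count of each base name
--     count = {}
--
--     for placeholder in placeholders:
--         # Extract the base name after the last dot
--         parts = placeholder.split(".")
--         base_name = f"{parts[0]}.{parts[1]}"
--
--         if base_name in full_var_mapping:
--             new_base_name = full_var_mapping[base_name]
--         else:
--             if parts[1] in count:
--                 count[parts[1]] += 1
--                 full_var_mapping[base_name] = f"{parts[1]}_{count[parts[1]]}"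
--             else:
--                 count[parts[1]] = 1
--                 full_var_mapping[base_name] = parts[1]
--             new_base_name = full_var_mapping[base_name]
--
--         # Create new variable name
--         new_name = f"{new_base_name}"
--         for other_part in parts[2:]:
--             if other_part.startswith("[") and other_part.endswith("]"):
--                 other_name = other_part[1:-1]
--             else:
--                 other_name = other_part
--
--             if can_convert_to_int(other_name):
--                 new_name += f"[{other_name}]"
--             else:
--                 new_name += f"['{other_name}']"
--
--         # Add to mapping
--         mapping[placeholder] = new_name
--
--     return mapping
-- ===== SOURCE B (Python) =====
-- def create_variable_mapping(placeholders):
--     """Two-pass version: first build the base-name table, then render each placeholder."""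
--
--     def can_convert_to_int(s):
--         try:
--             int(s)
--             return True
--         except ValueError:
--             return False
--
--     def format_suffix(other_part):
--         if other_part.startswith("[") and other_part.endswith("]"):
--             other_name = other_part[1:-1]
--         else:
--             other_name = other_part
--         if can_convert_to_int(other_name):
--             return f"[{other_name}]"
--         return f"['{other_name}']"
--
--     # Pass 1: assign a simplified name to every base name, in first-appearance order.
--     full_var_mapping = {}
--     count = {}
--     for placeholder in placeholders:
--         parts = placeholder.split(".")
--         base_name = f"{parts[0]}.{parts[1]}"
--         if base_name not in full_var_mapping:
--             if parts[1] in count: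
--                 count[parts[1]] += 1
--                 full_var_mapping[base_name] = f"{parts[1]}_{count[parts[1]]}"
--             else:
--                 count[parts[1]] = 1
--                 full_var_mapping[base_name] = parts[1]
--
--     # Pass 2: render each placeholder against the completed table.
--     mapping = {}
--     for placeholder in placeholders:
--         parts = placeholder.split(".")
--         base_name = f"{parts[0]}.{parts[1]}"
--         new_name = full_var_mapping[base_name]
--         for other_part in parts[2:]:
--             new_name += format_suffix(other_part)
--         mapping[placeholder] = new_name
--     return mapping
-- ===== Notes on version B (the rewrite author's own statement) =====
-- stated objective: alternative
-- what changed: Single interleaved loop split into two passes: pass one builds only the base-name table (first-appearance numbering), pass two renders every placeholder against the completed table.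
import Mathlib
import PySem

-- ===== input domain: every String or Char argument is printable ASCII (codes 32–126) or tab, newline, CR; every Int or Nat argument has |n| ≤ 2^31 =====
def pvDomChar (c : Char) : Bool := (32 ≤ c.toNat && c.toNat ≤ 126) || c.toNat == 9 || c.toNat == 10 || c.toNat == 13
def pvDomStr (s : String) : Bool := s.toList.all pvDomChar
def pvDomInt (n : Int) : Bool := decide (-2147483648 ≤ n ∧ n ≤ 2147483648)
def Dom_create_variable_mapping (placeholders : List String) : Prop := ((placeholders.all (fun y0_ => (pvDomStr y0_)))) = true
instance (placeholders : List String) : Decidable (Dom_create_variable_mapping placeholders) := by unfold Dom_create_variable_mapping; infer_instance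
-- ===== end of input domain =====

-- B replaces A's single interleaved loop by two passes (build the base-name table, then
-- render against the completed table); same asymptotic cost (objective: alternative).
-- Pre_ excludes exactly the inputs where Python A raises IndexError (a placeholder with no '.').

-- ===== PORT A =====
-- placeholder.split("."): sep "." is nonempty, so split? never returns none
def pvSplit (p : String) : List String := (PySem.Str.split? p ".").getD []

-- can_convert_to_int(s): int(s) succeeds
def pvCanInt (s : String) : Bool := (PySem.Int.ofStr? s).isSome

-- the body of A's inner `for other_part in parts[2:]` formatting one part
def pvFmt (op : String) : String :=
  let on := if PySem.Str.startswith op "[" && PySem.Str.endswith op "]"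
            then PySem.Str.slice op (some 1) (some (-1)) else op
  if pvCanInt on then "[" ++ on ++ "]" else "['" ++ on ++ "']"

-- loop body of A: state = (mapping, full_var_mapping, count)
def cvmStepA (st : PySem.Dict String String × PySem.Dict String String × PySem.Dict String Int)
    (placeholder : String) :
    PySem.Dict String String × PySem.Dict String String × PySem.Dict String Int :=
  let parts := pvSplit placeholder
  -- parts[0], parts[1]: in range whenever Pre_ holds (Python raises IndexError otherwise)
  let base := PySem.List.pyGetD parts 0 "" ++ "." ++ PySem.List.pyGetD parts 1 ""
  let p1 := PySem.List.pyGetD parts 1 ""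
  let step :=
    match st.2.1.get? base with
    | some v => (v, st.2.1, st.2.2)
    | none =>
      if st.2.2.contains p1 then
        let c := st.2.2.getD p1 0 + 1
        (p1 ++ "_" ++ PySem.Int.toStr c,
         st.2.1.insert base (p1 ++ "_" ++ PySem.Int.toStr c), st.2.2.insert p1 c)
      else (p1, st.2.1.insert base p1, st.2.2.insert p1 1)
  let newName := (PySem.List.slice parts (some 2) none).foldl (fun acc op => acc ++ pvFmt op) step.1
  (st.1.insert placeholder newName, step.2.1, step.2.2)

def create_variable_mapping (placeholders : List String) : List (String × String) :=
  (placeholders.foldl cvmStepA (PySem.Dict.empty, PySem.Dict.empty, PySem.Dict.empty)).1.items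

-- ===== PORT B =====
-- pass-1 loop body of B: state = (full_var_mapping, count)
def cvmStep1 (st : PySem.Dict String String × PySem.Dict String Int) (placeholder : String) :
    PySem.Dict String String × PySem.Dict String Int :=
  let parts := pvSplit placeholder
  let base := PySem.List.pyGetD parts 0 "" ++ "." ++ PySem.List.pyGetD parts 1 ""
  let p1 := PySem.List.pyGetD parts 1 ""
  if st.1.contains base then st
  else if st.2.contains p1 then
    let c := st.2.getD p1 0 + 1
    (st.1.insert base (p1 ++ "_" ++ PySem.Int.toStr c), st.2.insert p1 c)
  else (st.1.insert base p1, st.2.insert p1 1)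

def create_variable_mapping_alt (placeholders : List String) : List (String × String) :=
  let fvm := (placeholders.foldl cvmStep1 (PySem.Dict.empty, PySem.Dict.empty)).1
  (placeholders.foldl (fun m placeholder =>
      let parts := pvSplit placeholder
      let base := PySem.List.pyGetD parts 0 "" ++ "." ++ PySem.List.pyGetD parts 1 ""
      let newName := (PySem.List.slice parts (some 2) none).foldl
        (fun acc op => acc ++ pvFmt op) (fvm.getD base "")
      m.insert placeholder newName) PySem.Dict.empty).items

-- ===== PRECONDITION & SPEC =====
-- Pre_ excludes exactly the placeholders with fewer than two '.'-separated parts,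
-- on which Python A (and Python B) raise IndexError at parts[1].
def Pre_create_variable_mapping (placeholders : List String) : Prop :=
  ∀ p ∈ placeholders, 2 ≤ (pvSplit p).length
instance (placeholders : List String) : Decidable (Pre_create_variable_mapping placeholders) := by
  unfold Pre_create_variable_mapping; infer_instance

def pvWitness_create_variable_mapping : List String :=
  ["flow.node1.output", "flow.node1.[0]", "other.node1", "flow.node1.output"]

def Spec_create_variable_mapping (placeholders : List String) (out : List (String × String)) : Prop := out = create_variable_mapping_alt placeholders
instance (placeholders : List String) (out : List (String × String)) : Decidable (Spec_create_variable_mapping placeholders out) := by unfold Spec_create_variable_mapping; infer_instance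

-- ===== CLAIM (what is proved, stated in full; the proofs are below) =====
def Claim_equal_create_variable_mapping : Prop := ∀ (placeholders : List String), Dom_create_variable_mapping placeholders → Pre_create_variable_mapping placeholders → Spec_create_variable_mapping placeholders (create_variable_mapping placeholders)

-- ===== LEMMAS AND PROOFS =====

-- the table after B's first pass, started from an arbitrary state
def cvmTab (ps : List String) (st : PySem.Dict String String × PySem.Dict String Int) :
    PySem.Dict String String × PySem.Dict String Int :=
  ps.foldl cvmStep1 st

-- first-pass table bindings are never overwritten
lemma cvmTab_mono (ps : List String) (st : PySem.Dict String String × PySem.Dict String Int)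
    (k : String) (v : String) (h : st.1.get? k = some v) :
    (cvmTab ps st).1.get? k = some v := by
  induction ps generalizing st with
  | nil => exact h
  | cons p rest ih =>
    apply ih
    by_cases hc : st.1.contains (PySem.List.pyGetD (pvSplit p) 0 "" ++ "." ++
        PySem.List.pyGetD (pvSplit p) 1 "")
    · simp only [cvmStep1, hc, if_true]; exact h
    · have hk : k ≠ (PySem.List.pyGetD (pvSplit p) 0 "" ++ "." ++
          PySem.List.pyGetD (pvSplit p) 1 "") := by
        intro he
        rw [PySem.Dict.contains_eq_isSome_get?, ← he, h] at hc
        simp at hc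
      simp only [cvmStep1, hc]
      split_ifs <;> simpa [PySem.Dict.get?_insert_of_ne _ _ hk] using h

lemma cvm_main (ps : List String) (m : PySem.Dict String String)
    (fvm : PySem.Dict String String) (count : PySem.Dict String Int) :
    (ps.foldl cvmStepA (m, fvm, count)).1 =
    ps.foldl (fun m' placeholder =>
      let parts := pvSplit placeholder
      let base := PySem.List.pyGetD parts 0 "" ++ "." ++ PySem.List.pyGetD parts 1 ""
      let newName := (PySem.List.slice parts (some 2) none).foldl
        (fun acc op => acc ++ pvFmt op) ((cvmTab ps (fvm, count)).1.getD base "")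
      m'.insert placeholder newName) m := by
  induction ps generalizing m fvm count with
  | nil => rfl
  | cons p rest ih =>
    simp only [List.foldl_cons]
    have hTdef : cvmTab (p :: rest) (fvm, count) = cvmTab rest (cvmStep1 (fvm, count) p) := rfl
    cases hg : fvm.get? (PySem.List.pyGetD (pvSplit p) 0 "" ++ "." ++
        PySem.List.pyGetD (pvSplit p) 1 "") with
    | some v =>
      have hc : fvm.contains (PySem.List.pyGetD (pvSplit p) 0 "" ++ "." ++
          PySem.List.pyGetD (pvSplit p) 1 "") = true := by
        rw [PySem.Dict.contains_eq_isSome_get?, hg]; rfl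
      have hstepA : cvmStepA (m, fvm, count) p =
          (m.insert p ((PySem.List.slice (pvSplit p) (some 2) none).foldl
            (fun acc op => acc ++ pvFmt op) v), fvm, count) := by
        simp only [cvmStepA, hg]
      have hstep1 : cvmStep1 (fvm, count) p = (fvm, count) := by
        simp only [cvmStep1, hc, if_true]
      have hT : (cvmTab (p :: rest) (fvm, count)).1.get? (PySem.List.pyGetD (pvSplit p) 0 ""
          ++ "." ++ PySem.List.pyGetD (pvSplit p) 1 "") = some v := by
        rw [hTdef, hstep1]; exact cvmTab_mono rest _ _ v hg
      rw [hstepA, ih]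
      rw [show cvmTab rest (fvm, count) = cvmTab (p :: rest) (fvm, count) by
        rw [hTdef, hstep1]]
      rw [PySem.Dict.getD_of_get?_eq_some _ "" hT]
    | none =>
      have hc : fvm.contains (PySem.List.pyGetD (pvSplit p) 0 "" ++ "." ++
          PySem.List.pyGetD (pvSplit p) 1 "") = false := by
        rw [PySem.Dict.contains_eq_isSome_get?, hg]; rfl
      by_cases hcc : count.contains (PySem.List.pyGetD (pvSplit p) 1 "") = true
      · have hstepA : cvmStepA (m, fvm, count) p =
            (m.insert p ((PySem.List.slice (pvSplit p) (some 2) none).foldl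
              (fun acc op => acc ++ pvFmt op)
              (PySem.List.pyGetD (pvSplit p) 1 "" ++ "_" ++
                PySem.Int.toStr (count.getD (PySem.List.pyGetD (pvSplit p) 1 "") 0 + 1))),
             fvm.insert (PySem.List.pyGetD (pvSplit p) 0 "" ++ "." ++
               PySem.List.pyGetD (pvSplit p) 1 "")
               (PySem.List.pyGetD (pvSplit p) 1 "" ++ "_" ++
                 PySem.Int.toStr (count.getD (PySem.List.pyGetD (pvSplit p) 1 "") 0 + 1)),
             count.insert (PySem.List.pyGetD (pvSplit p) 1 "")
               (count.getD (PySem.List.pyGetD (pvSplit p) 1 "") 0 + 1)) := by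
          simp only [cvmStepA, hg, hcc, if_true]
        have hstep1 : cvmStep1 (fvm, count) p =
            (fvm.insert (PySem.List.pyGetD (pvSplit p) 0 "" ++ "." ++
               PySem.List.pyGetD (pvSplit p) 1 "")
               (PySem.List.pyGetD (pvSplit p) 1 "" ++ "_" ++
                 PySem.Int.toStr (count.getD (PySem.List.pyGetD (pvSplit p) 1 "") 0 + 1)),
             count.insert (PySem.List.pyGetD (pvSplit p) 1 "")
               (count.getD (PySem.List.pyGetD (pvSplit p) 1 "") 0 + 1)) := by
          simp only [cvmStep1, hc, hcc, if_true, if_false, Bool.false_eq_true]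
        have hT : (cvmTab (p :: rest) (fvm, count)).1.get? (PySem.List.pyGetD (pvSplit p) 0 ""
            ++ "." ++ PySem.List.pyGetD (pvSplit p) 1 "") =
            some (PySem.List.pyGetD (pvSplit p) 1 "" ++ "_" ++
              PySem.Int.toStr (count.getD (PySem.List.pyGetD (pvSplit p) 1 "") 0 + 1)) := by
          rw [hTdef, hstep1]
          exact cvmTab_mono rest _ _ _ (PySem.Dict.get?_insert_self _ _ _)
        rw [hstepA, ih]
        rw [show cvmTab rest (fvm.insert (PySem.List.pyGetD (pvSplit p) 0 "" ++ "." ++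
               PySem.List.pyGetD (pvSplit p) 1 "")
               (PySem.List.pyGetD (pvSplit p) 1 "" ++ "_" ++
                 PySem.Int.toStr (count.getD (PySem.List.pyGetD (pvSplit p) 1 "") 0 + 1)),
             count.insert (PySem.List.pyGetD (pvSplit p) 1 "")
               (count.getD (PySem.List.pyGetD (pvSplit p) 1 "") 0 + 1))
            = cvmTab (p :: rest) (fvm, count) by rw [hTdef, hstep1]]
        rw [PySem.Dict.getD_of_get?_eq_some _ "" hT]
      · have hstepA : cvmStepA (m, fvm, count) p =
            (m.insert p ((PySem.List.slice (pvSplit p) (some 2) none).foldl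
              (fun acc op => acc ++ pvFmt op) (PySem.List.pyGetD (pvSplit p) 1 "")),
             fvm.insert (PySem.List.pyGetD (pvSplit p) 0 "" ++ "." ++
               PySem.List.pyGetD (pvSplit p) 1 "") (PySem.List.pyGetD (pvSplit p) 1 ""),
             count.insert (PySem.List.pyGetD (pvSplit p) 1 "") 1) := by
          simp only [cvmStepA, hg, hcc, if_false, Bool.false_eq_true]
        have hstep1 : cvmStep1 (fvm, count) p =
            (fvm.insert (PySem.List.pyGetD (pvSplit p) 0 "" ++ "." ++
               PySem.List.pyGetD (pvSplit p) 1 "") (PySem.List.pyGetD (pvSplit p) 1 ""),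
             count.insert (PySem.List.pyGetD (pvSplit p) 1 "") 1) := by
          simp only [cvmStep1, hc, hcc, if_false, Bool.false_eq_true]
        have hT : (cvmTab (p :: rest) (fvm, count)).1.get? (PySem.List.pyGetD (pvSplit p) 0 ""
            ++ "." ++ PySem.List.pyGetD (pvSplit p) 1 "") =
            some (PySem.List.pyGetD (pvSplit p) 1 "") := by
          rw [hTdef, hstep1]
          exact cvmTab_mono rest _ _ _ (PySem.Dict.get?_insert_self _ _ _)
        rw [hstepA, ih]
        rw [show cvmTab rest (fvm.insert (PySem.List.pyGetD (pvSplit p) 0 "" ++ "." ++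
               PySem.List.pyGetD (pvSplit p) 1 "") (PySem.List.pyGetD (pvSplit p) 1 ""),
             count.insert (PySem.List.pyGetD (pvSplit p) 1 "") 1)
            = cvmTab (p :: rest) (fvm, count) by rw [hTdef, hstep1]]
        rw [PySem.Dict.getD_of_get?_eq_some _ "" hT]

-- ===== VERDICT (by name: the statement is the Claim_ definition above) =====
theorem create_variable_mapping_spec : Claim_equal_create_variable_mapping := by
  intro placeholders _ _
  show create_variable_mapping placeholders = create_variable_mapping_alt placeholders
  unfold create_variable_mapping create_variable_mapping_alt
  rw [cvm_main]
  rfl
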